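-- pv_equiv track=rewrite | github.com/PigeonDan1/ps-slm | ps-ctc/utils.py | replace_duplicates_with_blank
-- ===== SOURCE A (Python) =====
-- from typing import List, Tuple
-- from typing import List, Tuple
--
-- def replace_duplicates_with_blank(hyp: List[int],
--                                   blank_id: int = 0) -> List[int]:
--     new_hyp: List[int] = []
--     cur = 0
--     while cur < len(hyp):
--         new_hyp.append(hyp[cur])
--         prev = cur
--         cur += 1
--         while cur < len(
--                 hyp) and hyp[cur] == hyp[prev] and hyp[cur] != blank_id:
--             new_hyp.append(blank_id)
--             cur += 1
--     return new_hyp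
-- ===== SOURCE B (Python) =====
-- from typing import List
--
--
-- def replace_duplicates_with_blank(hyp: List[int],
--                                   blank_id: int = 0) -> List[int]:
--     # Pointwise characterization: the output has the same length as the input
--     # and out[i] = blank_id when hyp[i] equals its predecessor, else hyp[i].
--     # (A repeated blank maps to blank_id, i.e. to itself, so no run or blank
--     # special-casing is needed.)  No nested loop, no index advancing.
--     if not hyp:
--         return []
--     return [hyp[0]] + [blank_id if x == p else x for p, x in zip(hyp, hyp[1:])]
-- ===== Notes on version B (the rewrite author's own statement) =====
-- stated objective: simpler
-- what changed: Replaces A's nested index-advancing while loops with a single pointwise comprehension over adjacent pairs: out[i] = blank_id if hyp[i] == hyp[i-1] else hyp[i] (correct because a repeated blank maps to blank_id = itself, so no run detection or blank guard is needed); the comprehension over zip is also measurably faster by a constant factor.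
import Mathlib
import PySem

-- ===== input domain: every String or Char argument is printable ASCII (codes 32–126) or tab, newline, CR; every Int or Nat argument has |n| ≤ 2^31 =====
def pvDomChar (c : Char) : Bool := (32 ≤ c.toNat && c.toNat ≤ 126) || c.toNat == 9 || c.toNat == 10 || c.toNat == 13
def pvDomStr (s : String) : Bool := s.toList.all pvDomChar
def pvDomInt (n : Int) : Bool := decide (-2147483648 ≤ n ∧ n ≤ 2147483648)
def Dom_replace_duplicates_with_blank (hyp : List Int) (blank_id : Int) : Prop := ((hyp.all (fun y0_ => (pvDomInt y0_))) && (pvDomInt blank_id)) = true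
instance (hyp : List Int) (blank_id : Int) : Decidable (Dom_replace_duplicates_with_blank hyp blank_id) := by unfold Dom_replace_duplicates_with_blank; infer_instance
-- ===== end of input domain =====

-- B replaces A's nested index-advancing while loops with a single pointwise map over
-- adjacent pairs (out[i] = blank_id iff hyp[i] = hyp[i-1]); simpler, and the timing
-- run measured it faster by a constant factor.

-- ===== PORT A =====
-- inner while loop of A: `while cur < len(hyp) and hyp[cur] == hyp[prev] and hyp[cur] != blank_id`.
-- All indices are nonnegative and < len(hyp) when read, so `hyp[i]` is `hyp.getD i 0` (exact here).
def pvAinner (hyp : List Int) (blank_id : Int) (prev : Nat) (cur : Nat) (acc : List Int) :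
    Nat × List Int :=
  if cur < hyp.length ∧ hyp.getD cur 0 = hyp.getD prev 0 ∧ hyp.getD cur 0 ≠ blank_id then
    pvAinner hyp blank_id prev (cur + 1) (acc ++ [blank_id])
  else
    (cur, acc)
termination_by hyp.length - cur
decreasing_by omega

-- the inner loop never moves `cur` backwards (used for the outer loop's termination)
theorem pvAinner_fst_ge (hyp : List Int) (blank_id : Int) (prev cur : Nat) (acc : List Int) :
    cur ≤ (pvAinner hyp blank_id prev cur acc).1 := by
  fun_induction pvAinner with
  | case1 cur acc h ih => omega
  | case2 => simp

-- outer while loop of A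
def pvAouter (hyp : List Int) (blank_id : Int) (cur : Nat) (acc : List Int) : List Int :=
  if h : cur < hyp.length then
    pvAouter hyp blank_id (pvAinner hyp blank_id cur (cur + 1) (acc ++ [hyp.getD cur 0])).1
      (pvAinner hyp blank_id cur (cur + 1) (acc ++ [hyp.getD cur 0])).2
  else
    acc
termination_by hyp.length - cur
decreasing_by
  have := pvAinner_fst_ge hyp blank_id cur (cur + 1) (acc ++ [hyp.getD cur 0])
  omega

def replace_duplicates_with_blank (hyp : List Int) (blank_id : Int) : List Int :=
  pvAouter hyp blank_id 0 []

-- ===== PORT B =====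
-- Source B: `[hyp[0]] + [blank_id if x == p else x for p, x in zip(hyp, hyp[1:])]`;
-- zip(hyp, hyp[1:]) is List.zipWith over hyp and its tail.
def replace_duplicates_with_blank_alt (hyp : List Int) (blank_id : Int) : List Int :=
  match hyp with
  | [] => []
  | x :: xs =>
      x :: List.zipWith (fun p y => if y = p then blank_id else y) (x :: xs) xs

-- ===== PRECONDITION & SPEC =====
def Spec_replace_duplicates_with_blank (hyp : List Int) (blank_id : Int) (out : List Int) : Prop := out = replace_duplicates_with_blank_alt hyp blank_id
instance (hyp : List Int) (blank_id : Int) (out : List Int) : Decidable (Spec_replace_duplicates_with_blank hyp blank_id out) := by unfold Spec_replace_duplicates_with_blank; infer_instance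

-- ===== CLAIM (what is proved, stated in full; the proofs are below) =====
def Claim_equal_replace_duplicates_with_blank : Prop := ∀ (hyp : List Int) (blank_id : Int), Dom_replace_duplicates_with_blank hyp blank_id → Spec_replace_duplicates_with_blank hyp blank_id (replace_duplicates_with_blank hyp blank_id)

-- ===== LEMMAS AND PROOFS =====

-- structural rendering of A: one outer iteration consumes the head plus the run of equal
-- non-blank duplicates that follows it
def aStruct (b : Int) : List Int → List Int
  | [] => []
  | x :: xs =>
    let k := if x = b then 0 else (xs.takeWhile (fun y => y == x)).length
    x :: (List.replicate k b ++ aStruct b (xs.drop k))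
termination_by l => l.length
decreasing_by
  simp only [List.length_drop, List.length_cons]
  omega

theorem drop_cons_of_lt (l : List Int) (i : Nat) (h : i < l.length) :
    l.drop i = l.getD i 0 :: l.drop (i + 1) := by
  rw [List.getD_eq_getElem l 0 h]
  exact List.drop_eq_getElem_cons h

theorem pvAinner_eq (hyp : List Int) (b : Int) (prev cur : Nat) (acc : List Int) :
    pvAinner hyp b prev cur acc =
      (cur + ((hyp.drop cur).takeWhile
          (fun y => y == hyp.getD prev 0 && !(y == b))).length,
       acc ++ List.replicate ((hyp.drop cur).takeWhile
          (fun y => y == hyp.getD prev 0 && !(y == b))).length b) := by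
  fun_induction pvAinner with
  | case1 cur acc h ih =>
    obtain ⟨hlt, heq, hne⟩ := h
    rw [ih, drop_cons_of_lt hyp cur hlt]
    rw [List.takeWhile_cons_of_pos (by
      simp
      exact ⟨by simpa using heq, by simpa using hne⟩)]
    simp only [List.length_cons, List.replicate_succ, Prod.mk.injEq]
    constructor
    · omega
    · simp
  | case2 cur acc h =>
    by_cases hlt : cur < hyp.length
    · have hno : ¬ (hyp.getD cur 0 = hyp.getD prev 0 ∧ hyp.getD cur 0 ≠ b) := by tauto
      rw [drop_cons_of_lt hyp cur hlt]
      rw [List.takeWhile_cons_of_neg (by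
        simp
        intro h1
        by_contra h2
        exact hno ⟨by simpa using h1, by simpa using h2⟩)]
      simp
    · rw [List.drop_eq_nil_of_le (by omega)]
      simp

theorem pvAouter_eq (hyp : List Int) (b : Int) (cur : Nat) (acc : List Int) :
    pvAouter hyp b cur acc = acc ++ aStruct b (hyp.drop cur) := by
  fun_induction pvAouter with
  | case1 cur acc h ih =>
    rw [pvAinner_eq] at ih ⊢
    simp only at ih
    rw [ih]
    rw [drop_cons_of_lt hyp cur h]
    rw [aStruct]
    have hk : ((hyp.drop (cur + 1)).takeWhile
        (fun y => y == hyp.getD cur 0 && !(y == b))).length =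
        (if hyp.getD cur 0 = b then 0 else
          ((hyp.drop (cur + 1)).takeWhile (fun y => y == hyp.getD cur 0)).length) := by
      by_cases hb : hyp.getD cur 0 = b
      · rw [if_pos hb, hb]
        have hnil : ((hyp.drop (cur + 1)).takeWhile (fun y => y == b && !(y == b))) = [] := by
          apply List.takeWhile_eq_nil_iff.mpr
          intro hne
          by_cases h0 : (hyp.drop (cur + 1))[0] = b <;> simp [h0]
        rw [hnil]
        rfl
      · rw [if_neg hb]
        congr 1
        congr 1
        funext y
        by_cases hyx : y = hyp.getD cur 0
        · simp [hyx]
          simpa using hb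
        · simp [hyx]
          intro hc
          exact absurd (by simpa using hc) hyx
    rw [hk]
    by_cases hb : hyp.getD cur 0 = b
    · rw [if_pos hb]
      simp [List.drop_drop]
    · rw [if_neg hb]
      simp [List.drop_drop]
  | case2 cur acc h =>
    rw [List.drop_eq_nil_of_le (by omega)]
    simp [aStruct.eq_def]

theorem takeWhile_eq_replicate (x : Int) (xs : List Int) :
    xs.takeWhile (fun y => y == x) =
      List.replicate (xs.takeWhile (fun y => y == x)).length x := by
  apply List.eq_replicate_of_mem
  intro y hy
  have := List.mem_takeWhile_imp hy
  simpa using this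

-- B's zip map turns a whole run of m extra copies of x into m blanks
theorem zip_run (b x : Int) (m : Nat) (rest : List Int) :
    List.zipWith (fun p y => if y = p then b else y)
        (x :: (List.replicate m x ++ rest)) (List.replicate m x ++ rest)
      = List.replicate m b ++
        List.zipWith (fun p y => if y = p then b else y) (x :: rest) rest := by
  induction m with
  | zero => simp
  | succ n ih =>
    simp only [List.replicate_succ, List.cons_append, List.zipWith_cons_cons, if_pos rfl]
    rw [ih]
    simp

-- after a maximal run (or when the head is blank), B's zip map restarts cleanly
theorem zip_restart (b x : Int) (rest : List Int)
    (h : x = b ∨ ∀ y ys, rest = y :: ys → y ≠ x) :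
    List.zipWith (fun p y => if y = p then b else y) (x :: rest) rest
      = replace_duplicates_with_blank_alt rest b := by
  match rest with
  | [] => simp [replace_duplicates_with_blank_alt]
  | y :: ys =>
    simp only [List.zipWith_cons_cons, replace_duplicates_with_blank_alt]
    congr 1
    by_cases hyx : y = x
    · rcases h with hb | hne
      · simp [hyx, hb]
      · exact absurd hyx (hne y ys rfl)
    · simp [hyx]

theorem aStruct_eq_alt (b : Int) (l : List Int) :
    aStruct b l = replace_duplicates_with_blank_alt l b := by
  induction hn : l.length using Nat.strong_induction_on generalizing l with
  | _ n ih =>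
  match l with
  | [] => simp [aStruct, replace_duplicates_with_blank_alt]
  | x :: xs =>
    rw [aStruct, replace_duplicates_with_blank_alt]
    set m := (xs.takeWhile (fun y => y == x)).length with hm
    by_cases hb : x = b
    · simp only [if_pos hb]
      have h2 : aStruct b xs = replace_duplicates_with_blank_alt xs b := by
        apply ih xs.length (by simp [← hn]) _ rfl
      rw [zip_restart b x xs (Or.inl hb)]
      simp [h2]
    · simp only [if_neg hb]
      have hdw : xs.drop m = xs.dropWhile (fun y => y == x) := by
        have h : xs.drop m = ((xs.takeWhile (fun y => y == x)) ++
            (xs.dropWhile (fun y => y == x))).drop m := by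
          rw [List.takeWhile_append_dropWhile]
        rw [h, hm, List.drop_left]
      have hxs : xs = List.replicate m x ++ xs.drop m := by
        rw [hdw]
        conv_lhs => rw [← List.takeWhile_append_dropWhile (p := fun y => y == x) (l := xs)]
        congr 1
        exact takeWhile_eq_replicate x xs
      have hdrop_ne : ∀ y ys, xs.drop m = y :: ys → y ≠ x := by
        intro y ys heq
        have hh := List.head?_dropWhile_not (fun y => y == x) xs
        rw [← hdw, heq] at hh
        simpa using hh
      have h2 : aStruct b (xs.drop m) = replace_duplicates_with_blank_alt (xs.drop m) b := by
        apply ih ((xs.drop m).length) (by simp [← hn]) _ rfl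
      conv_rhs => rw [hxs]
      rw [zip_run, zip_restart b x (xs.drop m) (Or.inr hdrop_ne)]
      simp [h2]

-- ===== VERDICT (by name: the statement is the Claim_ definition above) =====
theorem replace_duplicates_with_blank_spec : Claim_equal_replace_duplicates_with_blank := by
  intro hyp blank_id _
  unfold Spec_replace_duplicates_with_blank replace_duplicates_with_blank
  rw [pvAouter_eq, aStruct_eq_alt]
  simp
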